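-- pv_equiv track=rewrite | github.com/silentzero192/CTFtime-Writeups | 2026/0xfunCTF-2026/hardware/digital-transition/sol.py | tmds_decode
-- ===== SOURCE A (Python) =====
-- def tmds_decode(symbol_10bit):
--     """Decode a 10-bit TMDS symbol to 8-bit data value."""
--     bit9 = (symbol_10bit >> 9) & 1  # inversion flag
--     bit8 = (symbol_10bit >> 8) & 1  # XOR/XNOR mode flag
--     qm = symbol_10bit & 0xFF
--     if bit9:
--         qm = qm ^ 0xFF
--     d = [0] * 8
--     d[0] = qm & 1
--     for i in range(1, 8):
--         if bit8:  # XOR mode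
--             d[i] = ((qm >> i) & 1) ^ ((qm >> (i-1)) & 1)
--         else:     # XNOR mode
--             d[i] = ((qm >> i) & 1) ^ ((qm >> (i-1)) & 1) ^ 1
--     result = 0
--     for i in range(8):
--         result |= (d[i] << i)
--     return result
-- ===== SOURCE B (Python) =====
-- def tmds_decode(symbol_10bit):
--     """Decode a 10-bit TMDS symbol to 8-bit data value (closed-form, loop-free)."""
--     bit9 = (symbol_10bit >> 9) & 1  # inversion flag
--     bit8 = (symbol_10bit >> 8) & 1  # XOR/XNOR mode flag
--     qm = symbol_10bit & 0xFF
--     if bit9: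
--         qm ^= 0xFF
--     # differential decode in one step: bit0 = qm0, bit i = qm_i ^ qm_{i-1}
--     res = (qm ^ (qm << 1)) & 0xFF
--     if not bit8:  # XNOR mode flips bits 1..7
--         res ^= 0xFE
--     return res
-- ===== Notes on version B (the rewrite author's own statement) =====
-- stated objective: simpler
-- what changed: Replaced A's two 8-iteration loops and the intermediate per-bit list by a single closed-form bitwise step: res = (qm ^ (qm << 1)) & 0xFF, then res ^= 0xFE in XNOR mode.
import Mathlib
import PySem

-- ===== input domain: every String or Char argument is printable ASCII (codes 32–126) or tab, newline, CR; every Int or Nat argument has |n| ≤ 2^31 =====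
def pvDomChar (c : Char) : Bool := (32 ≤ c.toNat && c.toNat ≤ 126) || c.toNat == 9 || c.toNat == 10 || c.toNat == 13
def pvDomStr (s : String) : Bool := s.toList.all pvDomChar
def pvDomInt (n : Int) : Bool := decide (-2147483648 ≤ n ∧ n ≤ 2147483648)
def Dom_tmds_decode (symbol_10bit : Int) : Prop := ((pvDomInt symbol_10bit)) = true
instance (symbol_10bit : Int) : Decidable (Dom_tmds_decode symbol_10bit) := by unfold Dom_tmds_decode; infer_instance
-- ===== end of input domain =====

-- B replaces A's two 8-iteration loops and intermediate bit list by one closed-form bitwise step (simpler, loop-free).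

-- ===== PORT A =====
-- Loop indices i come from range(1,8)/range(8), so i ≥ 0 and .toNat is exact.
def tmds_decode (symbol_10bit : Int) : Int :=
  let bit9 := PySem.Int.band (symbol_10bit >>> 9) 1
  let bit8 := PySem.Int.band (symbol_10bit >>> 8) 1
  let qm := PySem.Int.band symbol_10bit 255
  let qm := if bit9 ≠ 0 then PySem.Int.bxor qm 255 else qm
  let d : List Int := List.replicate 8 0
  let d := d.set 0 (PySem.Int.band qm 1)
  let d := (PySem.List.pyRange 1 8 1).foldl (fun d i =>
    if bit8 ≠ 0 then
      d.set i.toNat (PySem.Int.bxor (PySem.Int.band (qm >>> i.toNat) 1)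
        (PySem.Int.band (qm >>> (i - 1).toNat) 1))
    else
      d.set i.toNat (PySem.Int.bxor (PySem.Int.bxor (PySem.Int.band (qm >>> i.toNat) 1)
        (PySem.Int.band (qm >>> (i - 1).toNat) 1)) 1)) d
  (PySem.List.pyRange 0 8 1).foldl (fun result i =>
    PySem.Int.bor result (PySem.List.pyGetD d i 0 <<< i.toNat)) 0

-- ===== PORT B =====
def tmds_decode_alt (symbol_10bit : Int) : Int :=
  let bit9 := PySem.Int.band (symbol_10bit >>> 9) 1
  let bit8 := PySem.Int.band (symbol_10bit >>> 8) 1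
  let qm := PySem.Int.band symbol_10bit 255
  let qm := if bit9 ≠ 0 then PySem.Int.bxor qm 255 else qm
  let res := PySem.Int.band (PySem.Int.bxor qm (qm <<< 1)) 255
  if bit8 = 0 then PySem.Int.bxor res 254 else res

-- ===== PRECONDITION & SPEC =====
def Spec_tmds_decode (symbol_10bit : Int) (out : Int) : Prop := out = tmds_decode_alt symbol_10bit
instance (symbol_10bit : Int) (out : Int) : Decidable (Spec_tmds_decode symbol_10bit out) := by unfold Spec_tmds_decode; infer_instance

-- ===== CLAIM (what is proved, stated in full; the proofs are below) =====
def Claim_equal_tmds_decode : Prop := ∀ (symbol_10bit : Int), Dom_tmds_decode symbol_10bit → Spec_tmds_decode symbol_10bit (tmds_decode symbol_10bit)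

-- ===== LEMMAS AND PROOFS =====

-- proof-only helpers: the two port bodies as functions of the two flag bits and the masked byte
def coreA (bit8 qm : Int) : Int :=
  let d : List Int := List.replicate 8 0
  let d := d.set 0 (PySem.Int.band qm 1)
  let d := (PySem.List.pyRange 1 8 1).foldl (fun d i =>
    if bit8 ≠ 0 then
      d.set i.toNat (PySem.Int.bxor (PySem.Int.band (qm >>> i.toNat) 1)
        (PySem.Int.band (qm >>> (i - 1).toNat) 1))
    else
      d.set i.toNat (PySem.Int.bxor (PySem.Int.bxor (PySem.Int.band (qm >>> i.toNat) 1)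
        (PySem.Int.band (qm >>> (i - 1).toNat) 1)) 1)) d
  (PySem.List.pyRange 0 8 1).foldl (fun result i =>
    PySem.Int.bor result (PySem.List.pyGetD d i 0 <<< i.toNat)) 0

def coreB (bit8 qm : Int) : Int :=
  let res := PySem.Int.band (PySem.Int.bxor qm (qm <<< 1)) 255
  if bit8 = 0 then PySem.Int.bxor res 254 else res

def qmOf (bit9 q : Int) : Int := if bit9 ≠ 0 then PySem.Int.bxor q 255 else q

theorem portA_eq (s : Int) :
    tmds_decode s = coreA (PySem.Int.band (s >>> 8) 1)
      (qmOf (PySem.Int.band (s >>> 9) 1) (PySem.Int.band s 255)) := rfl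

theorem portB_eq (s : Int) :
    tmds_decode_alt s = coreB (PySem.Int.band (s >>> 8) 1)
      (qmOf (PySem.Int.band (s >>> 9) 1) (PySem.Int.band s 255)) := rfl

theorem band_mask_bounds (x : Int) (n : Nat) :
    0 ≤ PySem.Int.band x ↑n ∧ PySem.Int.band x ↑n ≤ ↑n := by
  unfold PySem.Int.band
  have hn : (0:Int) ≤ ↑n := Int.natCast_nonneg n
  split_ifs with h1
  · exact ⟨Int.natCast_nonneg _, by exact_mod_cast Nat.and_le_right⟩
  · refine ⟨Int.natCast_nonneg _, ?_⟩
    exact_mod_cast Nat.sub_le n (n &&& (-x - 1).toNat)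

set_option maxRecDepth 8192 in
set_option maxHeartbeats 2000000 in
theorem core_eq (b9 b8 : Int) (h9 : b9 = 0 ∨ b9 = 1) (h8 : b8 = 0 ∨ b8 = 1) :
    ∀ n : ℕ, n < 256 → coreA b8 (qmOf b9 ↑n) = coreB b8 (qmOf b9 ↑n) := by
  rcases h9 with rfl | rfl <;> rcases h8 with rfl | rfl <;> decide

-- ===== VERDICT (by name: the statement is the Claim_ definition above) =====
theorem tmds_decode_spec : Claim_equal_tmds_decode := by
  intro s _
  unfold Spec_tmds_decode
  rw [portA_eq, portB_eq]
  have hq := band_mask_bounds s 255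
  have h9 := band_mask_bounds (s >>> 9) 1
  have h8 := band_mask_bounds (s >>> 8) 1
  norm_num at hq h9 h8
  obtain ⟨n, hn⟩ : ∃ n : ℕ, PySem.Int.band s 255 = ↑n := ⟨_, (Int.toNat_of_nonneg hq.1).symm⟩
  rw [hn]
  exact core_eq _ _ (by omega) (by omega) n (by omega)
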